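-- pv_equiv track=rewrite | github.com/michal-jenco/weaving | code/run3.py | mirror_symmetry
-- ===== SOURCE A (Python) =====
-- def mirror_symmetry(grid, axis='vertical'):
--     rows = len(grid)
--     cols = len(grid[0]) if rows else 0
--     out = [[0]*cols for _ in range(rows)]
--     if axis == 'vertical':
--         for r in range(rows):
--             for c in range(cols):
--                 out[r][c] = grid[r][c] if c < cols//2 else grid[r][cols - 1 - c]
--     else:
--         for r in range(rows):
--             for c in range(cols):
--                 out[r][c] = grid[r][c] if r < rows//2 else grid[rows - 1 - r][c]
--     return out
-- ===== SOURCE B (Python) =====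
-- def mirror_symmetry(grid, axis='vertical'):
--     rows = len(grid)
--     cols = len(grid[0]) if rows else 0
--     if axis == 'vertical':
--         # each output row = left half, then the first ceil(cols/2) cells reversed
--         return [row[:cols // 2] + row[:cols - cols // 2][::-1] for row in grid]
--     # same idea at row granularity; copy rows so the output never aliases the input
--     return [list(r) for r in grid[:rows // 2]] + \
--            [list(r) for r in reversed(grid[:rows - rows // 2])]
-- ===== Notes on version B (the rewrite author's own statement) =====
-- stated objective: faster
-- what changed: Replaced the preallocated matrix filled by element-at-a-time nested index loops with direct slice concatenation (left prefix + reversed prefix), one comprehension per branch; the per-cell Python loop body disappears into C-level slice/reverse operations.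
-- outside the precondition, e.g. on mirror_symmetry([[1], [2, 3], [4]], 'horizontal'): A returns [[1], [2], [1]], B returns [[1], [2, 3], [1]]
import Mathlib
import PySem

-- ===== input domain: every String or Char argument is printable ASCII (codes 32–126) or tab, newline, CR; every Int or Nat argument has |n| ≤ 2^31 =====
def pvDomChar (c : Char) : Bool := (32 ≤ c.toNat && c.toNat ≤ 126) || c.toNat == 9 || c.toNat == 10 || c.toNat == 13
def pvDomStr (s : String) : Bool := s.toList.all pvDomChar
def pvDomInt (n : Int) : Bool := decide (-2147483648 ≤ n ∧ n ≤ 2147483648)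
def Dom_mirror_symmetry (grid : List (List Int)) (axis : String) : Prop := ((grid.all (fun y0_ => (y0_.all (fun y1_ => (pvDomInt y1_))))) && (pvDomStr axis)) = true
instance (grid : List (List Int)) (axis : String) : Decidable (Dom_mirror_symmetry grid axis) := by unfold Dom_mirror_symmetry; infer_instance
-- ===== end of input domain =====

-- Header: B replaces A's preallocated matrix and nested per-cell index loops with slice
-- concatenation (left prefix + reversed prefix), per row or per grid; measured faster in Python.

-- ===== PORT A =====
-- pyGetI row c = row[c]; exact for the in-range indices A produces on rectangular (Pre_) input
def pyGetI (row : List Int) (c : Nat) : Int := row.getD c 0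

def pyGetR (g : List (List Int)) (r : Nat) : List Int := g.getD r []

def mirror_symmetry (grid : List (List Int)) (axis : String) : List (List Int) :=
  let rows := grid.length
  let cols := if rows ≠ 0 then (grid.headD []).length else 0
  let out := List.replicate rows (List.replicate cols (0 : Int))
  if axis == "vertical" then
    (List.range rows).foldl (fun out r =>
      out.set r ((List.range cols).foldl (fun row c =>
        row.set c (if c < cols / 2 then pyGetI (pyGetR grid r) c
                   else pyGetI (pyGetR grid r) (cols - 1 - c))) (out.getD r []))) out
  else
    (List.range rows).foldl (fun out r =>
      out.set r ((List.range cols).foldl (fun row c =>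
        row.set c (if r < rows / 2 then pyGetI (pyGetR grid r) c
                   else pyGetI (pyGetR grid (rows - 1 - r)) c)) (out.getD r []))) out

-- ===== PORT B =====
def mirror_symmetry_alt (grid : List (List Int)) (axis : String) : List (List Int) :=
  let rows := grid.length
  let cols := if rows ≠ 0 then (grid.headD []).length else 0
  if axis == "vertical" then
    grid.map (fun row => row.take (cols / 2) ++ (row.take (cols - cols / 2)).reverse)
  else
    (grid.take (rows / 2)).map (fun r => r) ++
      ((grid.take (rows - rows / 2)).reverse.map (fun r => r))

-- ===== PRECONDITION & SPEC =====
-- Pre_ excludes exactly the ragged grids on which A raises IndexError (it reads a row beyond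
-- its length) or on which A silently truncates an over-long row to the first row's length, an
-- artefact of its preallocated output that B (which keeps rows whole) does not reproduce.
def Pre_mirror_symmetry (grid : List (List Int)) (axis : String) : Prop :=
  let cols := (grid.headD []).length
  if axis == "vertical" then ∀ row ∈ grid, cols - cols / 2 ≤ row.length
  else ∀ row ∈ grid.take (grid.length - grid.length / 2), row.length = cols

instance (grid : List (List Int)) (axis : String) : Decidable (Pre_mirror_symmetry grid axis) := by
  unfold Pre_mirror_symmetry; infer_instance

def pvWitness_mirror_symmetry : List (List Int) × String := ([[1, 2, 3], [4, 5, 6]], "vertical")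

-- (Spec)
def Spec_mirror_symmetry (grid : List (List Int)) (axis : String) (out : List (List Int)) : Prop := out = mirror_symmetry_alt grid axis
instance (grid : List (List Int)) (axis : String) (out : List (List Int)) : Decidable (Spec_mirror_symmetry grid axis out) := by unfold Spec_mirror_symmetry; infer_instance

-- ===== CLAIM (what is proved, stated in full; the proofs are below) =====
def Claim_equal_mirror_symmetry : Prop := ∀ (grid : List (List Int)) (axis : String), Dom_mirror_symmetry grid axis → Pre_mirror_symmetry grid axis → Spec_mirror_symmetry grid axis (mirror_symmetry grid axis)

-- ===== LEMMAS AND PROOFS =====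
theorem foldl_set_range {α : Type} (f : Nat → α) :
    ∀ (n : Nat) (l : List α), n ≤ l.length →
      (List.range n).foldl (fun acc c => acc.set c (f c)) l
        = (List.range n).map f ++ l.drop n := by
  intro n
  induction n with
  | zero => intro l h; simp
  | succ n ih =>
    intro l h
    have hn : n < l.length := by omega
    rw [List.range_succ, List.foldl_append, List.map_append, ih l (by omega),
        List.drop_eq_getElem_cons hn]
    simp only [List.foldl_cons, List.foldl_nil]
    rw [List.set_append_right n (f n) (by simp)]
    have hlen : (List.map f (List.range n)).length = n := by simp
    rw [hlen, Nat.sub_self, List.set_cons_zero]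
    simp

theorem foldl_set_range_dep {α : Type} (d : α) (F : Nat → α → α) (base : α) :
    ∀ (n : Nat) (l : List α), n ≤ l.length → (∀ i < n, l.getD i d = base) →
      (List.range n).foldl (fun acc r => acc.set r (F r (acc.getD r d))) l
        = (List.range n).map (fun r => F r base) ++ l.drop n := by
  intro n
  induction n with
  | zero => intro l h hb; simp
  | succ n ih =>
    intro l h hb
    have hn : n < l.length := by omega
    rw [List.range_succ, List.foldl_append, List.map_append,
        ih l (by omega) (fun i hi => hb i (by omega)),
        List.drop_eq_getElem_cons hn]
    have hget : ((List.range n).map (fun r => F r base) ++ l[n] :: l.drop (n+1)).getD n d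
        = l[n] := by
      rw [List.getD_append_right _ _ _ _ (by simp)]
      simp [List.getElem?_eq_getElem hn]
    rw [List.foldl_cons, List.foldl_nil, hget,
        List.set_append_right n _ (by simp)]
    have : l[n] = base := by
      have := hb n (by omega)
      rwa [List.getD_eq_getElem _ _ hn] at this
    simp [this]

theorem mirror_map_eq {α : Type} (d : α) (l : List α) (n : Nat) (h : n - n / 2 ≤ l.length) :
    (List.range n).map (fun i => if i < n / 2 then l.getD i d
                                 else l.getD (n - 1 - i) d)
      = l.take (n / 2) ++ (l.take (n - n / 2)).reverse := by
  apply List.ext_getElem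
  · simp; omega
  · intro i h1 h2
    simp only [List.getElem_map, List.getElem_range]
    by_cases hi : i < n / 2
    · rw [if_pos hi, List.getElem_append_left (by simp; omega)]
      rw [List.getElem_take, List.getD_eq_getElem _ _ (by omega)]
    · rw [if_neg hi, List.getElem_append_right (by simp; omega)]
      rw [List.getElem_reverse, List.getElem_take, List.getD_eq_getElem _ _ (by simp at h1; omega)]
      congr 1
      simp at h1
      simp
      omega

theorem rowcopy {α : Type} (d : α) (l : List α) :
    (List.range l.length).map (fun c => l.getD c d) = l := by
  apply List.ext_getElem
  · simp
  · intro i h1 h2; simp at h1 h2; simp [List.getD, List.getElem?_eq_getElem h1]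

theorem map_range_getD {α β : Type} (d : α) (G : α → β) (l : List α) :
    (List.range l.length).map (fun r => G (l.getD r d)) = l.map G := by
  apply List.ext_getElem
  · simp
  · intro i h1 h2; simp at h1 h2; simp [List.getD, List.getElem?_eq_getElem h1]

theorem ports_agree (grid : List (List Int)) (axis : String)
    (hpre : Pre_mirror_symmetry grid axis) :
    mirror_symmetry grid axis = mirror_symmetry_alt grid axis := by
  by_cases hnil : grid = []
  · subst hnil; simp [mirror_symmetry, mirror_symmetry_alt]
  have hne : grid.length ≠ 0 := by simpa [List.length_eq_zero_iff] using hnil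
  simp only [mirror_symmetry, mirror_symmetry_alt]
  rw [if_pos hne]
  set rows := grid.length with hrows
  set cols := grid.headD [] |>.length with hcols
  have houter : ∀ (v : Nat → Nat → Int),
      (List.range rows).foldl (fun out r =>
        out.set r ((List.range cols).foldl (fun row c => row.set c (v r c)) (out.getD r [])))
        (List.replicate rows (List.replicate cols (0 : Int)))
      = (List.range rows).map (fun r => (List.range cols).map (v r)) := by
    intro v
    rw [foldl_set_range_dep [] (fun r row0 => (List.range cols).foldl (fun row c => row.set c (v r c)) row0)
          (List.replicate cols (0 : Int)) rows _ (by simp) (by intro i hi; simp [hi])]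
    simp only [List.drop_replicate, Nat.sub_self, List.replicate_zero, List.append_nil]
    apply List.map_congr_left
    intro r _
    rw [foldl_set_range (v r) cols _ (by simp)]
    simp
  by_cases hax : (axis == "vertical") = true
  · simp only [Pre_mirror_symmetry, if_pos hax] at hpre
    rw [if_pos hax, if_pos hax, houter]
    have : (List.range rows).map (fun r => (List.range cols).map (fun c =>
        if c < cols / 2 then pyGetI (pyGetR grid r) c else pyGetI (pyGetR grid r) (cols - 1 - c)))
        = grid.map (fun row => (List.range cols).map (fun c =>
            if c < cols / 2 then pyGetI row c else pyGetI row (cols - 1 - c))) := by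
      rw [hrows]
      exact map_range_getD [] (fun row => (List.range cols).map (fun c =>
            if c < cols / 2 then pyGetI row c else pyGetI row (cols - 1 - c))) grid
    rw [this]
    apply List.map_congr_left
    intro row hrow
    simp only [pyGetI]
    exact mirror_map_eq (0 : Int) row cols (hpre row hrow)
  · simp only [Pre_mirror_symmetry, if_neg hax] at hpre
    rw [if_neg hax, if_neg hax, houter]
    have hmir := mirror_map_eq ([] : List Int) grid rows (by omega)
    rw [List.map_id', List.map_id', ← hmir]
    apply List.map_congr_left
    intro r hr
    simp only [List.mem_range] at hr
    have hrow_of : ∀ s, s < rows - rows / 2 → (grid.getD s []).length = cols := by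
      intro s hs
      have hsl : s < grid.length := by omega
      have hmem : grid.getD s [] ∈ grid.take (rows - rows / 2) := by
        have h' : s < (grid.take (rows - rows / 2)).length := by simp [← hrows]; omega
        have := List.getElem_mem h'
        rwa [List.getElem_take, ← List.getD_eq_getElem grid [] hsl] at this
      exact hpre _ hmem
    by_cases hh : r < rows / 2
    · rw [if_pos hh]
      simp only [if_pos hh, pyGetI, pyGetR]
      have h1 := hrow_of r (by omega)
      have := rowcopy (0 : Int) (grid.getD r [])
      rw [h1] at this
      simpa [List.getD] using this
    · rw [if_neg hh]
      simp only [if_neg hh, pyGetI, pyGetR]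
      have h1 := hrow_of (rows - 1 - r) (by omega)
      have := rowcopy (0 : Int) (grid.getD (rows - 1 - r) [])
      rw [h1] at this
      simpa [List.getD] using this

-- ===== VERDICT (by name: the statement is the Claim_ definition above) =====
theorem mirror_symmetry_spec : Claim_equal_mirror_symmetry := by
  intro grid axis _ hpre
  exact ports_agree grid axis hpre
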